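-- pv_equiv track=rewrite | github.com/shift-crops/CTFWriteups | 2020/DEF CON CTF/Quals/mooodem/getflag.py | check_sync
-- ===== SOURCE A (Python) =====
-- SYNC_BYTES          = 4
--
-- BITS_PER_BYTE       = 10
--
-- def check_sync(bits):
--     if len(bits) < SYNC_BYTES * BITS_PER_BYTE:
--         return False
--
--     if not (bits[0] == 0 and bits[BITS_PER_BYTE - 1] == 1):
--         return False
--     if not all(bits[0] == bits[i] for i in range(BITS_PER_BYTE, SYNC_BYTES * BITS_PER_BYTE, BITS_PER_BYTE)):
--         return False
--     if not all(bits[BITS_PER_BYTE - 1] == bits[BITS_PER_BYTE - 1 + i] for i in range(BITS_PER_BYTE, SYNC_BYTES * BITS_PER_BYTE, BITS_PER_BYTE)):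
--         return False
--
--     return True
-- ===== SOURCE B (Python) =====
-- SYNC_BYTES          = 4
--
-- BITS_PER_BYTE       = 10
--
-- def check_sync(bits):
--     # Single byte-by-byte pass: each sync byte must start with 0 and stop with 1.
--     if len(bits) < SYNC_BYTES * BITS_PER_BYTE:
--         return False
--     return all(bits[i * BITS_PER_BYTE] == 0 and bits[i * BITS_PER_BYTE + BITS_PER_BYTE - 1] == 1
--                for i in range(SYNC_BYTES))
-- ===== Notes on version B (the rewrite author's own statement) =====
-- stated objective: simpler
-- what changed: Replaced A's anchor check plus two separate all()-scans (all start bits equal bits[0], all stop bits equal bits[9]) with one byte-by-byte pass checking each byte's start bit == 0 and stop bit == 1 directly against the literals.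
import Mathlib
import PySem

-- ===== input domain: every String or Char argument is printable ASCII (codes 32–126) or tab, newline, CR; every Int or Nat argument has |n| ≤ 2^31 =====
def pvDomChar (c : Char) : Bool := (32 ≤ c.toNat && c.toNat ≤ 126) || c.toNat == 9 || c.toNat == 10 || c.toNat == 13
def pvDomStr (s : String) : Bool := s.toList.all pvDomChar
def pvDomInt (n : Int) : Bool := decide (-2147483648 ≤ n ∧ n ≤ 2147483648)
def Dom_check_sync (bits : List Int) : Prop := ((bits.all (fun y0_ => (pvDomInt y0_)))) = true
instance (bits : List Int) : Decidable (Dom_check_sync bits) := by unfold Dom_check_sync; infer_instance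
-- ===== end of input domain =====

-- B replaces A's anchor check + two all()-scans with one byte-by-byte pass against literals 0/1 (simpler).


-- ===== PORT A =====
def check_sync (bits : List Int) : Bool :=
  if bits.length < 4 * 10 then false
  else if !(PySem.List.pyGetD bits 0 0 == 0 && PySem.List.pyGetD bits (10 - 1) 0 == 1) then false
  else if !((PySem.List.pyRange 10 (4 * 10) 10).all
      (fun i => PySem.List.pyGetD bits 0 0 == PySem.List.pyGetD bits i 0)) then false
  else if !((PySem.List.pyRange 10 (4 * 10) 10).all
      (fun i => PySem.List.pyGetD bits (10 - 1) 0 == PySem.List.pyGetD bits (10 - 1 + i) 0)) then false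
  else true

-- ===== PORT B =====
def check_sync_alt (bits : List Int) : Bool :=
  if bits.length < 4 * 10 then false
  else (PySem.List.pyRange 0 4 1).all
    (fun i => PySem.List.pyGetD bits (i * 10) 0 == 0 && PySem.List.pyGetD bits (i * 10 + 10 - 1) 0 == 1)

-- ===== PRECONDITION & SPEC =====
def Spec_check_sync (bits : List Int) (out : Bool) : Prop := out = check_sync_alt bits
instance (bits : List Int) (out : Bool) : Decidable (Spec_check_sync bits out) := by unfold Spec_check_sync; infer_instance

-- ===== CLAIM (what is proved, stated in full; the proofs are below) =====
def Claim_equal_check_sync : Prop := ∀ (bits : List Int), Dom_check_sync bits → Spec_check_sync bits (check_sync bits)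

-- ===== LEMMAS AND PROOFS =====
theorem pyRange_sync : PySem.List.pyRange 10 (4 * 10) 10 = [10, 20, 30] := by decide

theorem pyRange_bytes : PySem.List.pyRange 0 4 1 = [0, 1, 2, 3] := by decide

-- ===== VERDICT (by name: the statement is the Claim_ definition above) =====
theorem check_sync_spec : Claim_equal_check_sync := by
  intro bits _
  unfold Spec_check_sync check_sync check_sync_alt
  by_cases h : bits.length < 4 * 10
  · simp [h]
  · rw [Bool.eq_iff_iff]
    simp only [h, if_false, pyRange_sync, pyRange_bytes, List.all_cons, List.all_nil,
      Bool.and_true]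
    norm_num only
    generalize PySem.List.pyGetD bits 0 0 = x0
    generalize PySem.List.pyGetD bits 9 0 = x9
    generalize PySem.List.pyGetD bits 10 0 = x10
    generalize PySem.List.pyGetD bits 20 0 = x20
    generalize PySem.List.pyGetD bits 30 0 = x30
    generalize PySem.List.pyGetD bits 19 0 = x19
    generalize PySem.List.pyGetD bits 29 0 = x29
    generalize PySem.List.pyGetD bits 39 0 = x39
    simp only [Bool.and_eq_true, Bool.not_eq_eq_eq_not, Bool.not_true, beq_iff_eq,
      Bool.ite_eq_true_distrib]
    split_ifs <;> simp_all <;> omega
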